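-- pv_equiv track=rewrite | github.com/Gray-Stone/esp-miniarm | src/pid_control.py | crc6_mt6701_msb_first
-- ===== SOURCE A (Python) =====
-- def crc6_mt6701_msb_first(value_18bits):
--     rem = 0        # 6-bit remainder
--     poly_lo = 0x03 # polynomial without the x^6 term
--     for i in range(17, -1, -1):  # process 18 bits MSB->LSB
--         bit = (value_18bits >> i) & 1
--         fb = ((rem >> 5) & 1) ^ bit
--         rem = ((rem << 1) & 0x3F)
--         if fb:
--             rem ^= poly_lo
--     return rem  # 6-bit CRC
-- ===== SOURCE B (Python) =====
-- def _build_crc6_table():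
--     table = []
--     for i in range(64):
--         rem = i
--         for _ in range(6):
--             if rem & 0x20:
--                 rem = ((rem << 1) ^ 0x03) & 0x3F
--             else:
--                 rem = (rem << 1) & 0x3F
--         table.append(rem)
--     return table
--
-- _CRC6_TABLE = _build_crc6_table()
--
-- def crc6_mt6701_msb_first(value_18bits):
--     rem = 0
--     for shift in (12, 6, 0):
--         chunk = (value_18bits >> shift) & 0x3F
--         rem = _CRC6_TABLE[rem ^ chunk]
--     return rem
-- ===== Notes on version B (the rewrite author's own statement) =====
-- stated objective: alternative
-- what changed: Replaces the bit-serial CRC loop (one iteration per input bit) with a precomputed remainder table indexed by six-bit chunks, doing three table lookups per call; per-call work is too small for a timing run to rank them.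
import Mathlib
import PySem

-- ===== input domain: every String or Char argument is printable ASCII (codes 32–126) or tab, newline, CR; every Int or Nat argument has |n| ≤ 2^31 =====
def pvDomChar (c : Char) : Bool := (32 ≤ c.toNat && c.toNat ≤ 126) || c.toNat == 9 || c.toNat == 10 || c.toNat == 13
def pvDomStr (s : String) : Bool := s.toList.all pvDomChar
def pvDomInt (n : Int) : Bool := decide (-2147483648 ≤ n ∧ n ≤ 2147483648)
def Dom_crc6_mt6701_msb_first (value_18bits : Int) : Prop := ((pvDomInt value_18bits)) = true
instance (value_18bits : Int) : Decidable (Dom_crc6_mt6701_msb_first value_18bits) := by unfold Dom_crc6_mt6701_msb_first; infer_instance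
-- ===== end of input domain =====

-- B replaces A's bit-serial CRC loop by a precomputed remainder table and three six-bit chunk lookups (alternative algorithm, same return value on every int).

-- ===== PORT A =====
-- A's loop body, verbatim: bit = (v >> i) & 1; fb = ((rem >> 5) & 1) ^ bit; rem = (rem << 1) & 0x3F; if fb: rem ^= poly_lo
-- (i runs 17..0 here, so i.toNat is exact for Python's 'value_18bits >> i')
def crc6Body (value_18bits : Int) (rem : Int) (i : Int) : Int :=
  let poly_lo : Int := 3
  let bit := PySem.Int.band (value_18bits >>> i.toNat) 1
  let fb := PySem.Int.bxor (PySem.Int.band (rem >>> (5:Nat)) 1) bit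
  let rem2 := PySem.Int.band (rem <<< (1:Nat)) 63
  if fb ≠ 0 then PySem.Int.bxor rem2 poly_lo else rem2

-- rem = 0; for i in range(17, -1, -1): <body>; return rem
def crc6_mt6701_msb_first (value_18bits : Int) : Int :=
  (PySem.List.pyRange 17 (-1) (-1)).foldl (crc6Body value_18bits) 0

-- ===== PORT B =====
-- _build_crc6_table entry i: start from i, six shift/xor rounds (rem & 0x20 truthy ↔ ≠ 0)
def pvCrcEntry (i : Int) : Int :=
  (List.range 6).foldl (fun rem _ =>
    if PySem.Int.band rem 32 ≠ 0 then PySem.Int.band (PySem.Int.bxor (rem <<< (1:Nat)) 3) 63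
    else PySem.Int.band (rem <<< (1:Nat)) 63) i

def pvCrcTable : List Int := (List.range 64).map (fun i => pvCrcEntry (i : Int))

def crc6_mt6701_msb_first_alt (value_18bits : Int) : Int :=
  ([12, 6, 0] : List Int).foldl (fun rem shift =>
    -- shift is 12, 6 or 0, so shift.toNat is exact for Python's '>> shift'
    let chunk := PySem.Int.band (value_18bits >>> (shift.toNat : Nat)) 63
    -- rem ^ chunk is provably in [0, 64), so table[rem ^ chunk] never raises; pyGetD is exact here
    PySem.List.pyGetD pvCrcTable (PySem.Int.bxor rem chunk) 0) 0

-- ===== PRECONDITION & SPEC =====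
def Spec_crc6_mt6701_msb_first (value_18bits : Int) (out : Int) : Prop := out = crc6_mt6701_msb_first_alt value_18bits
instance (value_18bits : Int) (out : Int) : Decidable (Spec_crc6_mt6701_msb_first value_18bits out) := by unfold Spec_crc6_mt6701_msb_first; infer_instance

-- ===== CLAIM (what is proved, stated in full; the proofs are below) =====
def Claim_equal_crc6_mt6701_msb_first : Prop := ∀ (value_18bits : Int), Dom_crc6_mt6701_msb_first value_18bits → Spec_crc6_mt6701_msb_first value_18bits (crc6_mt6701_msb_first value_18bits)

-- ===== LEMMAS AND PROOFS =====

-- bit j of c (as A's loop reads it)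
def pvBit (c : Int) (j : Nat) : Int := PySem.Int.band (c >>> j) 1
-- one round of A's loop, fed an explicit bit
def pvStep (r b : Int) : Int :=
  let fb := PySem.Int.bxor (PySem.Int.band (r >>> (5:Nat)) 1) b
  let r2 := PySem.Int.band (r <<< (1:Nat)) 63
  if fb ≠ 0 then PySem.Int.bxor r2 3 else r2
-- six rounds fed the low six bits of c, MSB first
def pvRun6 (r c : Int) : Int :=
  pvStep (pvStep (pvStep (pvStep (pvStep (pvStep r (pvBit c 5)) (pvBit c 4)) (pvBit c 3)) (pvBit c 2)) (pvBit c 1)) (pvBit c 0)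

theorem pv_nat_and63 (m : Nat) : m &&& 63 = m % 64 := by
  have := Nat.and_two_pow_sub_one_eq_mod m 6
  norm_num at this; omega

theorem pv_band63 (c : Int) : PySem.Int.band c 63 = c % 64 := by
  unfold PySem.Int.band
  have h63 : (63:Int).toNat = 63 := rfl
  split_ifs with h1 h2 h2
  · rw [h63, pv_nat_and63]
    have : (c.toNat : Int) = c := Int.toNat_of_nonneg h1
    omega
  · exact absurd (by norm_num) h2
  · rw [h63, Nat.and_comm, pv_nat_and63]
    have hc : ((-c-1).toNat : Int) = -c-1 := Int.toNat_of_nonneg (by omega)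
    omega
  · exact absurd (by norm_num) h2

theorem pv_shr_shr (v : Int) (a b : Nat) : (v >>> a) >>> b = v >>> (a + b) := by
  simp [Int.shiftRight_eq_div_pow, Int.ediv_ediv_of_nonneg, pow_add]

theorem pv_bit_mask (c : Int) (j : Nat) (hj : j < 6) : pvBit c j = pvBit (c % 64) j := by
  unfold pvBit
  rw [PySem.Int.band_one, PySem.Int.band_one,
      PySem.Int.mod_eq_emod_of_pos (by norm_num), PySem.Int.mod_eq_emod_of_pos (by norm_num),
      Int.shiftRight_eq_div_pow, Int.shiftRight_eq_div_pow]
  interval_cases j <;> norm_num <;> omega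

theorem pv_run6_mask (r c : Int) : pvRun6 r c = pvRun6 r (c % 64) := by
  unfold pvRun6
  rw [pv_bit_mask c 5 (by norm_num), pv_bit_mask c 4 (by norm_num), pv_bit_mask c 3 (by norm_num),
      pv_bit_mask c 2 (by norm_num), pv_bit_mask c 1 (by norm_num), pv_bit_mask c 0 (by norm_num)]

set_option maxRecDepth 100000 in
set_option maxHeartbeats 4000000 in
theorem pv_key : ∀ r : Nat, r < 64 → ∀ d : Nat, d < 64 →
    pvRun6 (r : Int) (d : Int) = PySem.List.pyGetD pvCrcTable (PySem.Int.bxor (r : Int) (d : Int)) 0 := by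
  decide

theorem pv_bxor_small (a b : Int) (ha0 : 0 ≤ a) (ha1 : a < 64) (hb0 : 0 ≤ b) (hb1 : b < 64) :
    0 ≤ PySem.Int.bxor a b ∧ PySem.Int.bxor a b < 64 := by
  unfold PySem.Int.bxor
  rw [if_pos ha0, if_pos hb0]
  refine ⟨Int.natCast_nonneg _, ?_⟩
  have ha : a.toNat < 2 ^ 6 := by norm_num; omega
  have hb : b.toNat < 2 ^ 6 := by norm_num; omega
  have hx : a.toNat ^^^ b.toNat < 64 := by
    have := Nat.xor_lt_two_pow ha hb
    simpa using this
  exact_mod_cast hx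

theorem pv_step_bound (r b : Int) : 0 ≤ pvStep r b ∧ pvStep r b < 64 := by
  simp only [pvStep]
  have hb := pv_band63 (r <<< (1:Nat))
  have h0 : 0 ≤ (r <<< (1:Nat)) % 64 := Int.emod_nonneg _ (by norm_num)
  have h1 : (r <<< (1:Nat)) % 64 < 64 := Int.emod_lt_of_pos _ (by norm_num)
  split_ifs
  · exact pv_bxor_small (PySem.Int.band (r <<< (1:Nat)) 63) 3
      (by rw [hb]; omega) (by rw [hb]; omega) (by norm_num) (by norm_num)
  · rw [hb]; omega

theorem pv_run6_bound (r c : Int) : 0 ≤ pvRun6 r c ∧ pvRun6 r c < 64 := by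
  unfold pvRun6; exact pv_step_bound _ _

theorem pv_bridge (r c : Int) (h0 : 0 ≤ r) (h1 : r < 64) :
    PySem.List.pyGetD pvCrcTable (PySem.Int.bxor r (PySem.Int.band c 63)) 0 = pvRun6 r c := by
  rw [pv_band63, pv_run6_mask]
  have hd0 : 0 ≤ c % 64 := Int.emod_nonneg c (by norm_num)
  have hd1 : c % 64 < 64 := Int.emod_lt_of_pos c (by norm_num)
  have h := pv_key r.toNat (by omega) (c % 64).toNat (by omega)
  rw [Int.toNat_of_nonneg h0, Int.toNat_of_nonneg hd0] at h
  exact h.symm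

theorem pv_group (v r : Int) (a : Nat) :
    List.foldl (crc6Body v) r
      [((a+5 : Nat) : Int), ((a+4 : Nat) : Int), ((a+3 : Nat) : Int),
       ((a+2 : Nat) : Int), ((a+1 : Nat) : Int), ((a : Nat) : Int)]
      = pvRun6 r (v >>> a) := by
  simp only [List.foldl, crc6Body, pvRun6, pvStep, pvBit, pv_shr_shr, Int.toNat_natCast,
    Nat.add_zero]
  rfl

theorem pv_A_eq (v : Int) :
    crc6_mt6701_msb_first v
      = pvRun6 (pvRun6 (pvRun6 0 (v >>> (12:Nat))) (v >>> (6:Nat))) (v >>> (0:Nat)) := by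
  have hr : PySem.List.pyRange 17 (-1) (-1)
      = ([((12+5 : Nat) : Int), ((12+4 : Nat) : Int), ((12+3 : Nat) : Int),
          ((12+2 : Nat) : Int), ((12+1 : Nat) : Int), ((12 : Nat) : Int)]
          ++ [((6+5 : Nat) : Int), ((6+4 : Nat) : Int), ((6+3 : Nat) : Int),
              ((6+2 : Nat) : Int), ((6+1 : Nat) : Int), ((6 : Nat) : Int)])
          ++ [((0+5 : Nat) : Int), ((0+4 : Nat) : Int), ((0+3 : Nat) : Int),
              ((0+2 : Nat) : Int), ((0+1 : Nat) : Int), ((0 : Nat) : Int)] := by decide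
  simp only [crc6_mt6701_msb_first]
  rw [hr, List.foldl_append, List.foldl_append, pv_group, pv_group, pv_group]

-- ===== VERDICT (by name: the statement is the Claim_ definition above) =====
theorem crc6_mt6701_msb_first_spec : Claim_equal_crc6_mt6701_msb_first := by
  intro v _
  unfold Spec_crc6_mt6701_msb_first
  rw [pv_A_eq]
  have hb0 := pv_run6_bound 0 (v >>> (12:Nat))
  have h1 := pv_bridge 0 (v >>> (12:Nat)) le_rfl (by norm_num)
  have hb1 := pv_run6_bound (pvRun6 0 (v >>> (12:Nat))) (v >>> (6:Nat))
  have h2 := pv_bridge (pvRun6 0 (v >>> (12:Nat))) (v >>> (6:Nat)) hb0.1 hb0.2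
  have h3 := pv_bridge (pvRun6 (pvRun6 0 (v >>> (12:Nat))) (v >>> (6:Nat))) (v >>> (0:Nat)) hb1.1 hb1.2
  simp only [crc6_mt6701_msb_first_alt, List.foldl,
    show ((12:Int).toNat) = (12:Nat) from rfl, show ((6:Int).toNat) = (6:Nat) from rfl,
    show ((0:Int).toNat) = (0:Nat) from rfl]
  rw [h1, h2, h3]
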